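-- pv_equiv track=rewrite | github.com/GetPageSpeed/nginx-extras-docs | generate.py | convert_headings
-- ===== SOURCE A (Python) =====
-- def convert_headings(lines):
--     """Converts headings to GitHub-flavored Markdown."""
--     converted_lines = []
--     i = 0
--     inside_code_section = False
--     while i < len(lines):  # Iterate through all lines
--         current_line = lines[i]
--
--         # Check if we are inside a code section
--         if current_line.startswith('```'):
--             inside_code_section = not inside_code_section
--
--         if not inside_code_section and i + 1 < len(lines):  # Check if the next line exists
--             next_line = lines[i + 1].strip()
--
--             # Check if the next line consists solely of '=' or '-' characters
--             if set(next_line) == {'='}: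
--                 heading = '#' + ' ' + current_line  # Convert to level 1 heading
--                 converted_lines.append(heading)
--                 i += 2  # Skip the next line
--                 continue
--             elif set(next_line) == {'-'}:
--                 heading = '##' + ' ' + current_line  # Convert to level 2 heading
--                 converted_lines.append(heading)
--                 i += 2  # Skip the next line
--                 continue
--
--         # Add the current line as is if it's not a heading or there's no next line
--         converted_lines.append(current_line)
--         i += 1
--
--     return "\n".join(converted_lines)
-- ===== SOURCE B (Python) =====
-- def convert_headings(lines):
--     """Converts headings to GitHub-flavored Markdown (single forward pass,
--     rewriting the previously emitted line instead of peeking ahead)."""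
--     out = []
--     inside_code_section = False
--     consumable = False  # the last emitted line may still become a heading
--     for line in lines:
--         chars = set(line.strip())
--         if consumable and not inside_code_section and chars == {'='}:
--             out[-1] = '# ' + out[-1]
--             consumable = False
--         elif consumable and not inside_code_section and chars == {'-'}:
--             out[-1] = '## ' + out[-1]
--             consumable = False
--         else:
--             if line.startswith('```'):
--                 inside_code_section = not inside_code_section
--             out.append(line)
--             consumable = not inside_code_section
--     return "\n".join(out)
-- ===== Notes on version B (the rewrite author's own statement) =====
-- stated objective: alternative
-- what changed: Replaced A's index-based while loop that peeks at lines[i+1] and skips it with i += 2 by a single forward for-pass that looks behind: when the current line is an all-'='/all-'-' underline outside code and the previously emitted line is still consumable, it rewrites that last emitted line in place into the heading.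
import Mathlib
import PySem

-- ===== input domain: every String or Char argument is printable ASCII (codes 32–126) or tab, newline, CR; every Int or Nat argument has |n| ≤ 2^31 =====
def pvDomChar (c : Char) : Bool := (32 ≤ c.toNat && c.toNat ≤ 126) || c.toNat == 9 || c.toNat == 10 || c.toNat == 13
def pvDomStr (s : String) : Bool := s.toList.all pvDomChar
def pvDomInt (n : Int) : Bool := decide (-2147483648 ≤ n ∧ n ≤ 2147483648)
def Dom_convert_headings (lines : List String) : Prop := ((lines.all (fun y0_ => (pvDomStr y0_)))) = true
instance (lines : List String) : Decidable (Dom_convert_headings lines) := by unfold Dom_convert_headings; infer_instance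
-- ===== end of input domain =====

-- B is an alternative decomposition of the same pass: a look-behind rewrite of the
-- previously emitted line instead of A's look-ahead with an index skip.

-- ===== PORT A =====
-- the while loop over i, consuming one line (append) or two (heading + skipped underline)
def convGoA (inside : Bool) : List String → List String
  | [] => []
  | [current] =>
      -- i + 1 < len(lines) fails: current is appended as is and the loop ends
      [current]
  | current :: next :: rest =>
      let inside' := if PySem.Str.startswith current "```" then !inside else inside
      let s := PySem.Set.ofList (PySem.Str.strip next).toList
      if !inside' && PySem.Set.equal s ['='] then
        ("#" ++ " " ++ current) :: convGoA inside' rest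
      else if !inside' && PySem.Set.equal s ['-'] then
        ("##" ++ " " ++ current) :: convGoA inside' rest
      else
        current :: convGoA inside' (next :: rest)

def convert_headings (lines : List String) : String :=
  PySem.Str.join "\n" (convGoA false lines)

-- ===== PORT B =====
-- the for loop of Source B; out is kept reversed (append = cons, out[-1] = head)
def convGoB (racc : List String) (inside consumable : Bool) : List String → List String
  | [] => racc.reverse
  | line :: rest =>
      let s := PySem.Set.ofList (PySem.Str.strip line).toList
      if consumable && !inside && PySem.Set.equal s ['='] then
        convGoB (match racc with
                 | h :: t => ("# " ++ h) :: t
                 | [] => []) inside false rest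
      else if consumable && !inside && PySem.Set.equal s ['-'] then
        convGoB (match racc with
                 | h :: t => ("## " ++ h) :: t
                 | [] => []) inside false rest
      else
        let inside' := if PySem.Str.startswith line "```" then !inside else inside
        convGoB (line :: racc) inside' (!inside') rest

def convert_headings_alt (lines : List String) : String :=
  PySem.Str.join "\n" (convGoB [] false false lines)

-- ===== PRECONDITION & SPEC =====
def Spec_convert_headings (lines : List String) (out : String) : Prop := out = convert_headings_alt lines
instance (lines : List String) (out : String) : Decidable (Spec_convert_headings lines out) := by unfold Spec_convert_headings; infer_instance

-- ===== CLAIM (what is proved, stated in full; the proofs are below) =====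
def Claim_equal_convert_headings : Prop := ∀ (lines : List String), Dom_convert_headings lines → Spec_convert_headings lines (convert_headings lines)

-- ===== LEMMAS AND PROOFS =====

-- A's state just after the fence toggle of line c, before the look-ahead at rest
def convMidA (inside' : Bool) (c : String) : List String → List String
  | [] => [c]
  | next :: rest' =>
      let s := PySem.Set.ofList (PySem.Str.strip next).toList
      if !inside' && PySem.Set.equal s ['='] then
        ("#" ++ " " ++ c) :: convGoA inside' rest'
      else if !inside' && PySem.Set.equal s ['-'] then
        ("##" ++ " " ++ c) :: convGoA inside' rest'
      else
        c :: convGoA inside' (next :: rest')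

theorem convGoA_cons (inside : Bool) (c : String) (rest : List String) :
    convGoA inside (c :: rest) =
      convMidA (if PySem.Str.startswith c "```" then !inside else inside) c rest := by
  cases rest <;> rfl

-- the paired look-behind invariant, by strong induction on the remaining length
theorem convB_invariant :
    ∀ (n : Nat) (rest : List String), rest.length ≤ n →
      (∀ (inside : Bool) (racc : List String),
        convGoB racc inside false rest = racc.reverse ++ convGoA inside rest) ∧
      (∀ (inside' : Bool) (c : String) (racc : List String),
        convGoB (c :: racc) inside' (!inside') rest = racc.reverse ++ convMidA inside' c rest) := by
  intro n
  induction n with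
  | zero =>
      intro rest hlen
      have h0 : rest = [] := List.eq_nil_of_length_eq_zero (Nat.le_zero.mp hlen)
      subst h0
      exact ⟨fun inside racc => by simp [convGoB, convGoA],
             fun inside' c racc => by simp [convGoB, convMidA]⟩
  | succ n ih =>
      intro rest hlen
      constructor
      · -- L: consumable = false
        intro inside racc
        cases rest with
        | nil => simp [convGoB, convGoA]
        | cons c rest' =>
            have hle : rest'.length ≤ n := by
              simpa using Nat.lt_succ_iff.mp (Nat.lt_of_lt_of_le (by simp) hlen)
            rw [convGoA_cons]
            show convGoB (c :: racc)
                (if PySem.Str.startswith c "```" then !inside else inside)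
                (!(if PySem.Str.startswith c "```" then !inside else inside)) rest'
              = racc.reverse ++ convMidA (if PySem.Str.startswith c "```" then !inside else inside) c rest'
            exact (ih rest' hle).2 _ c racc
      · -- M: consumable = !inside', last emitted line c
        intro inside' c racc
        cases rest with
        | nil => simp [convGoB, convMidA]
        | cons nxt rest' =>
            have hle : rest'.length ≤ n := by
              simpa using Nat.lt_succ_iff.mp (Nat.lt_of_lt_of_le (by simp) hlen)
            cases inside' with
            | true =>
                calc convGoB (c :: racc) true (!true) (nxt :: rest')
                    = convGoB (nxt :: c :: racc)
                        (if PySem.Str.startswith nxt "```" then !true else true)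
                        (!(if PySem.Str.startswith nxt "```" then !true else true)) rest' := rfl
                  _ = (c :: racc).reverse ++
                        convMidA (if PySem.Str.startswith nxt "```" then !true else true) nxt rest' :=
                      (ih rest' hle).2 _ nxt (c :: racc)
                  _ = racc.reverse ++ convMidA true c (nxt :: rest') := by
                      rw [show convMidA true c (nxt :: rest')
                           = c :: convGoA true (nxt :: rest') from rfl, convGoA_cons]
                      simp
            | false =>
                simp only [convGoB, convMidA, Bool.not_false, Bool.true_and]
                split_ifs with h1 h2
                · rw [(ih rest' hle).1 false (("# " ++ c) :: racc)]
                  simp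
                · rw [(ih rest' hle).1 false (("## " ++ c) :: racc)]
                  simp
                · rw [(ih rest' hle).2 _ nxt (c :: racc), convGoA_cons]
                  simp_all
                · rw [(ih rest' hle).2 _ nxt (c :: racc), convGoA_cons]
                  simp_all

-- ===== VERDICT (by name: the statement is the Claim_ definition above) =====
theorem convert_headings_spec : Claim_equal_convert_headings := by
  intro lines _
  unfold Spec_convert_headings convert_headings convert_headings_alt
  rw [(convB_invariant lines.length lines le_rfl).1 false []]
  simp
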